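-- pv_equiv track=rewrite | github.com/ICE0208/leetcode | easy/1217.py | minCostToMoveChips
-- ===== SOURCE A (Python) =====
-- def minCostToMoveChips(position):
--     min_cost = float("inf")
--
--     for pos in position:
--         cur_cost = 0
--         isOdd = pos%2
--         for v in position:
--             if v%2 == isOdd:
--                 continue
--             cur_cost += 1
--         min_cost = min(min_cost, cur_cost)
--     return min_cost
-- ===== SOURCE B (Python) =====
-- def minCostToMoveChips(position):
--     odd = sum(p % 2 for p in position)
--     return min(odd, len(position) - odd)
-- ===== Notes on version B (the rewrite author's own statement) =====
-- stated objective: faster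
-- what changed: Replace the quadratic per-chip opposite-parity rescans with a single pass counting odd positions and returning min(odd, even).
-- outside the precondition, e.g. on minCostToMoveChips([]): A returns inf, B returns 0
import Mathlib
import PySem

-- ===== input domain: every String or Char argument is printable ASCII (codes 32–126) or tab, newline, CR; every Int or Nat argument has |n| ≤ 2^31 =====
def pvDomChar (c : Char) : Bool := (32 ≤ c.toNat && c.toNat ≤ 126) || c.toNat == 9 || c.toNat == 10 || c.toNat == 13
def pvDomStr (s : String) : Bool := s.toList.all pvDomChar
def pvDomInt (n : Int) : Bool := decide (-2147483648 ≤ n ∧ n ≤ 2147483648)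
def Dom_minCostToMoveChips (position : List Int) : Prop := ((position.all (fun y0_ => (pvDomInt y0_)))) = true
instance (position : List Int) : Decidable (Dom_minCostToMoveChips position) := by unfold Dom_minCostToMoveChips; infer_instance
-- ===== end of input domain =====

-- B replaces A's quadratic per-chip rescans with one pass counting odd positions (asymptotically faster).

-- ===== PORT A =====
-- min_cost starts as float('inf'); modelled as Option Int (none = inf), min(inf, c) = c.
-- The final .getD 0 is only reached on the empty list, which Pre_ excludes (A returns a float there).
def minCostToMoveChips (position : List Int) : Int :=
  (position.foldl
    (fun (min_cost : Option Int) pos =>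
      let isOdd := PySem.Int.mod pos 2
      let cur_cost := position.foldl
        (fun c v => if PySem.Int.mod v 2 = isOdd then c else c + 1) 0
      some (match min_cost with
            | none => cur_cost
            | some m => min m cur_cost)) none).getD 0

-- ===== PORT B =====
def minCostToMoveChips_alt (position : List Int) : Int :=
  let odd := position.foldl (fun s p => s + PySem.Int.mod p 2) 0
  min odd ((position.length : Int) - odd)

-- ===== PRECONDITION & SPEC =====
-- Pre_ excludes the empty list: there A returns float('inf'), not an int.
def Pre_minCostToMoveChips (position : List Int) : Prop := position ≠ []
instance (position : List Int) : Decidable (Pre_minCostToMoveChips position) := by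
  unfold Pre_minCostToMoveChips; infer_instance
def pvWitness_minCostToMoveChips : List Int := [1, 2, 3]

def Spec_minCostToMoveChips (position : List Int) (out : Int) : Prop := out = minCostToMoveChips_alt position
instance (position : List Int) (out : Int) : Decidable (Spec_minCostToMoveChips position out) := by unfold Spec_minCostToMoveChips; infer_instance

-- ===== CLAIM (what is proved, stated in full; the proofs are below) =====
def Claim_equal_minCostToMoveChips : Prop := ∀ (position : List Int), Dom_minCostToMoveChips position → Pre_minCostToMoveChips position → Spec_minCostToMoveChips position (minCostToMoveChips position)

-- ===== LEMMAS AND PROOFS =====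

-- Python's % with positive divisor 2 is Lean's emod
theorem pvmod2 (v : Int) : PySem.Int.mod v 2 = v % 2 :=
  PySem.Int.mod_eq_emod_of_pos (by norm_num)

theorem pv_parity (v : Int) : v % 2 = 0 ∨ v % 2 = 1 := Int.emod_two_eq_zero_or_one v

def pvOdd (xs : List Int) : Int := xs.countP (fun v => v % 2 = 1)
def pvEven (xs : List Int) : Int := xs.countP (fun v => v % 2 = 0)

theorem pv_sum_mod2 (xs : List Int) : ∀ (a : Int),
    xs.foldl (fun s p => s + p % 2) a = a + pvOdd xs := by
  induction xs with
  | nil => intro a; simp [pvOdd]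
  | cons x xs ih =>
    intro a
    simp only [List.foldl_cons, ih, pvOdd, List.countP_cons]
    rcases pv_parity x with h | h <;> rw [h] <;> simp <;> push_cast <;> ring

theorem pv_odd_add_even (xs : List Int) : pvOdd xs + pvEven xs = (xs.length : Int) := by
  induction xs with
  | nil => simp [pvOdd, pvEven]
  | cons x xs ih =>
    unfold pvOdd pvEven at *
    rcases pv_parity x with h | h
    · rw [List.countP_cons_of_neg (pa := by simp [h]), List.countP_cons_of_pos (pa := by simp [h]),
        List.length_cons]
      push_cast
      omega
    · rw [List.countP_cons_of_pos (pa := by simp [h]), List.countP_cons_of_neg (pa := by simp [h]),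
        List.length_cons]
      push_cast
      omega

-- the inner loop's value for a given pos (on the %-level)
def pvCur (xs : List Int) (pos : Int) : Int :=
  if pos % 2 = 1 then pvEven xs else pvOdd xs

theorem pvCur_even (xs : List Int) (v : Int) (h : v % 2 = 0) : pvCur xs v = pvOdd xs := by
  unfold pvCur; rw [if_neg (by omega)]

theorem pvCur_odd (xs : List Int) (v : Int) (h : v % 2 = 1) : pvCur xs v = pvEven xs := by
  unfold pvCur; rw [if_pos h]

theorem pv_inner_fold (xs : List Int) (r : Int) : ∀ (a : Int),
    xs.foldl (fun c v => if v % 2 = r then c else c + 1) a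
      = a + xs.countP (fun v => ¬ v % 2 = r) := by
  induction xs with
  | nil => intro a; simp
  | cons x xs ih =>
    intro a
    simp only [List.foldl_cons, ih, List.countP_cons]
    by_cases h : x % 2 = r <;> simp [h] <;> push_cast <;> ring

theorem pv_inner_eq (xs : List Int) (pos : Int) :
    xs.foldl (fun c v => if v % 2 = pos % 2 then c else c + 1) 0
      = pvCur xs pos := by
  rw [pv_inner_fold]
  rcases pv_parity pos with h | h
  · rw [pvCur_even _ _ h, h]
    unfold pvOdd
    rw [zero_add]
    congr 1
    exact List.countP_congr (fun v _ => by rcases pv_parity v with hv | hv <;> simp [hv])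
  · rw [pvCur_odd _ _ h, h]
    unfold pvEven
    rw [zero_add]
    congr 1
    exact List.countP_congr (fun v _ => by rcases pv_parity v with hv | hv <;> simp [hv])

theorem pv_opt_fold (f : Int → Int) (ys : List Int) : ∀ (a : Int),
    ys.foldl
      (fun (m : Option Int) pos =>
        some (match m with | none => f pos | some m => min m (f pos))) (some a)
    = some (ys.foldl (fun m pos => min m (f pos)) a) := by
  induction ys with
  | nil => intro a; rfl
  | cons y ys ih => intro a; simp only [List.foldl_cons]; exact ih (min a (f y))

theorem pv_foldl_min_le_init (f : Int → Int) : ∀ (l : List Int) (a : Int),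
    l.foldl (fun m pos => min m (f pos)) a ≤ a := by
  intro l
  induction l with
  | nil => simp
  | cons x xs ih => intro a; exact le_trans (ih _) (min_le_left _ _)

theorem pv_foldl_min_le_mem (f : Int → Int) : ∀ (l : List Int) (a x : Int), x ∈ l →
    l.foldl (fun m pos => min m (f pos)) a ≤ f x := by
  intro l
  induction l with
  | nil => intro a x hx; cases hx
  | cons y ys ih =>
    intro a x hx
    rcases List.mem_cons.mp hx with h | h
    · subst h
      exact le_trans (pv_foldl_min_le_init f ys _) (min_le_right _ _)
    · exact ih _ _ h

theorem pv_le_foldl_min (f : Int → Int) : ∀ (l : List Int) (a c : Int),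
    c ≤ a → (∀ x ∈ l, c ≤ f x) →
    c ≤ l.foldl (fun m pos => min m (f pos)) a := by
  intro l
  induction l with
  | nil => intro a c ha _; simpa
  | cons y ys ih =>
    intro a c ha hl
    exact ih _ _ (le_min ha (hl y List.mem_cons_self))
      (fun x hx => hl x (List.mem_cons_of_mem _ hx))

theorem pv_cur_mem (xs : List Int) (pos : Int) :
    pvCur xs pos = pvOdd xs ∨ pvCur xs pos = pvEven xs := by
  unfold pvCur; split_ifs <;> simp

theorem pv_countP_nonneg (xs : List Int) (p : Int → Bool) : (0 : Int) ≤ xs.countP p := by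
  positivity

theorem pv_min_fold (x : Int) (rest : List Int) :
    (x :: rest).foldl (fun m pos => min m (pvCur (x :: rest) pos)) (pvCur (x :: rest) x)
      = min (pvOdd (x :: rest)) (pvEven (x :: rest)) := by
  set xs := x :: rest with hxs
  have hxmem : x ∈ xs := by rw [hxs]; exact List.mem_cons_self
  by_cases hodd : ∃ y ∈ xs, y % 2 = 1
  · by_cases heven : ∃ y ∈ xs, y % 2 = 0
    · -- both parities present: the fold visits both pvOdd and pvEven
      obtain ⟨yo, hyo, ho⟩ := hodd
      obtain ⟨ye, hye, he⟩ := heven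
      apply le_antisymm
      · apply le_min
        · have h1 := pv_foldl_min_le_mem (pvCur xs) xs (pvCur xs x) ye hye
          rwa [pvCur_even _ _ he] at h1
        · have h1 := pv_foldl_min_le_mem (pvCur xs) xs (pvCur xs x) yo hyo
          rwa [pvCur_odd _ _ ho] at h1
      · apply pv_le_foldl_min
        · rcases pv_cur_mem xs x with h | h <;> rw [h]
          · exact min_le_left _ _
          · exact min_le_right _ _
        · intro z _
          rcases pv_cur_mem xs z with h | h <;> rw [h]
          · exact min_le_left _ _
          · exact min_le_right _ _
    · -- all elements odd: pvEven = 0 and every pvCur = 0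
      push_neg at heven
      have hE : pvEven xs = 0 := by
        unfold pvEven
        rw [List.countP_eq_zero.mpr (by intro v hv; simpa using heven v hv)]
        rfl
      have hall : ∀ z ∈ xs, pvCur xs z = 0 := by
        intro z hz
        rcases pv_parity z with h | h
        · exact absurd h (heven z hz)
        · rw [pvCur_odd _ _ h, hE]
      have hO : (0:Int) ≤ pvOdd xs := pv_countP_nonneg _ _
      rw [min_eq_right (by omega : pvEven xs ≤ pvOdd xs), hE]
      apply le_antisymm
      · rw [hall x hxmem]
        exact pv_foldl_min_le_init (pvCur xs) xs 0
      · exact pv_le_foldl_min _ _ _ _ (by rw [hall x hxmem]) (fun z hz => by rw [hall z hz])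
  · -- no odd element: pvOdd = 0 and every pvCur = 0
    push_neg at hodd
    have hO : pvOdd xs = 0 := by
      unfold pvOdd
      rw [List.countP_eq_zero.mpr (by intro v hv; simpa using hodd v hv)]
      rfl
    have hall : ∀ z ∈ xs, pvCur xs z = 0 := by
      intro z hz
      rcases pv_parity z with h | h
      · rw [pvCur_even _ _ h, hO]
      · exact absurd h (hodd z hz)
    have hE : (0:Int) ≤ pvEven xs := pv_countP_nonneg _ _
    rw [min_eq_left (by omega : pvOdd xs ≤ pvEven xs), hO]
    apply le_antisymm
    · rw [hall x hxmem]
      exact pv_foldl_min_le_init (pvCur xs) xs 0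
    · exact pv_le_foldl_min _ _ _ _ (by rw [hall x hxmem]) (fun z hz => by rw [hall z hz])

-- ===== VERDICT (by name: the statement is the Claim_ definition above) =====
theorem minCostToMoveChips_spec : Claim_equal_minCostToMoveChips := by
  intro position _ hpre
  unfold Spec_minCostToMoveChips minCostToMoveChips minCostToMoveChips_alt
  obtain ⟨x, rest, rfl⟩ : ∃ x rest, position = x :: rest := by
    cases position with
    | nil => exact absurd rfl hpre
    | cons x rest => exact ⟨x, rest, rfl⟩
  simp only [pvmod2, pv_inner_eq]
  rw [pv_sum_mod2]
  have hB : min ((0:Int) + pvOdd (x :: rest)) (((x :: rest).length : Int) - (0 + pvOdd (x :: rest)))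
      = min (pvOdd (x :: rest)) (pvEven (x :: rest)) := by
    have := pv_odd_add_even (x :: rest)
    congr 1 <;> omega
  rw [hB]
  rw [List.foldl_cons]
  show (rest.foldl
      (fun (m : Option Int) pos =>
        some (match m with | none => pvCur (x :: rest) pos
                           | some m => min m (pvCur (x :: rest) pos)))
      (some (pvCur (x :: rest) x))).getD 0
    = min (pvOdd (x :: rest)) (pvEven (x :: rest))
  rw [pv_opt_fold]
  simp only [Option.getD_some]
  have h := pv_min_fold x rest
  simp only [List.foldl_cons, min_self] at h
  exact h
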